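-- pv_equiv track=rewrite | github.com/simao-eugenio/shypn | src/shypn/topology/structural/siphons.py | _filter_minimal_siphons
-- ===== SOURCE A (Python) =====
-- from typing import Any, Dict, List, Set, Optional
--
-- def _filter_minimal_siphons(siphons: List[Set[str]]) -> List[Set[str]]:
--     """Filter to minimal siphons (not contained in other siphons).
--
--     Args:
--         siphons: List of siphon place ID sets
--
--     Returns:
--         List of minimal siphon place ID sets
--     """
--     minimal = []
--
--     # Sort by size (smallest first)
--     sorted_siphons = sorted(siphons, key=len)
--
--     for siphon in sorted_siphons:
--         is_minimal = True
--
--         # Check if this siphon is contained in any existing minimal siphon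
--         for existing in minimal:
--             if siphon.issubset(existing):
--                 is_minimal = False
--                 break
--
--         if is_minimal:
--             # Remove any existing minimal siphons that contain this one
--             minimal = [s for s in minimal if not siphon.issubset(s)]
--             minimal.append(siphon)
--
--     return minimal
-- ===== SOURCE B (Python) =====
-- def _filter_minimal_siphons(siphons):
--     """Single pass over the size-sorted siphons with a hash set of frozensets:
--     on a size-ascending order, 'contained in a kept siphon' collapses to
--     'equal as a set to a kept siphon', so dedup by frozenset suffices."""
--     result = []
--     seen = set()
--     for siphon in sorted(siphons, key=len):
--         key = frozenset(siphon)
--         if key not in seen: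
--             seen.add(key)
--             result.append(siphon)
--     return result
-- ===== Notes on version B (the rewrite author's own statement) =====
-- stated objective: simpler
-- what changed: On a size-ascending order the subset test against kept siphons can only fire on set-equal siphons, so B replaces A's nested subset scan and superset-removal comprehension with a single pass keeping a hash set of frozensets (pure dedup).
import Mathlib
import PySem

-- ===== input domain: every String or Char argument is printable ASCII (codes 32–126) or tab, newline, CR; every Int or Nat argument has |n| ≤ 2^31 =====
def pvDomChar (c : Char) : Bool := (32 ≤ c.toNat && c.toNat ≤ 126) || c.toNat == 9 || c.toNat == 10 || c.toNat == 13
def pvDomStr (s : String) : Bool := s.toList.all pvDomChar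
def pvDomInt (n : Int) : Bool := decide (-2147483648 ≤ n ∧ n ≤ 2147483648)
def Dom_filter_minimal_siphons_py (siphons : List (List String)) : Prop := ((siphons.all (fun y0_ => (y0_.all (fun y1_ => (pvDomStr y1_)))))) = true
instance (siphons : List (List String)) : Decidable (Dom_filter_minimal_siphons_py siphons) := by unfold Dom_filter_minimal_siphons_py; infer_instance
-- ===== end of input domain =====

-- B replaces A's nested subset scan (and superset-removal comprehension) over the
-- size-sorted siphons by a single dedup pass with a hash set of frozensets; same
-- return value (mutation-free on both sides), objective: simpler.

-- len(s) for a Python set represented by a list of its elements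
def pvSetLen (xs : List String) : Int := ((PySem.Set.ofList xs).length : Int)

-- ===== PORT A =====
def filter_minimal_siphons_py (siphons : List (List String)) : List (List String) :=
  (PySem.List.sorted siphons (fun s => pvSetLen s) false).foldl
    (fun minimal siphon =>
      -- is_minimal = the inner for-loop with break
      if minimal.any (fun existing => PySem.Set.issubset siphon existing) then minimal
      else (minimal.filter (fun s => !(PySem.Set.issubset siphon s))) ++ [siphon])
    []

-- ===== PORT B =====
def filter_minimal_siphons_py_alt (siphons : List (List String)) : List (List String) :=
  ((PySem.List.sorted siphons (fun s => pvSetLen s) false).foldl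
    (fun (st : List (Finset String) × List (List String)) siphon =>
      -- key = frozenset(siphon); seen is st.1, result is st.2
      if siphon.toFinset ∈ st.1 then st
      else (st.1 ++ [siphon.toFinset], st.2 ++ [siphon]))
    ([], [])).2

-- ===== PRECONDITION & SPEC =====
def Spec_filter_minimal_siphons_py (siphons : List (List String)) (out : List (List String)) : Prop := out = filter_minimal_siphons_py_alt siphons
instance (siphons : List (List String)) (out : List (List String)) : Decidable (Spec_filter_minimal_siphons_py siphons out) := by unfold Spec_filter_minimal_siphons_py; infer_instance

-- ===== CLAIM (what is proved, stated in full; the proofs are below) =====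
def Claim_equal_filter_minimal_siphons_py : Prop := ∀ (siphons : List (List String)), Dom_filter_minimal_siphons_py siphons → Spec_filter_minimal_siphons_py siphons (filter_minimal_siphons_py siphons)

-- ===== LEMMAS AND PROOFS =====

theorem pvSetLen_eq_card (xs : List String) : pvSetLen xs = (xs.toFinset.card : Int) := by
  unfold pvSetLen
  have hf : (PySem.Set.ofList xs).toFinset = xs.toFinset := by
    apply Finset.ext
    intro a
    simp [List.mem_toFinset, PySem.Set.mem_ofList]
  have hn : (PySem.Set.ofList xs).Nodup := PySem.Set.nodup_ofList xs
  have := List.toFinset_card_of_nodup hn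
  rw [hf] at this
  exact_mod_cast this.symm

theorem issubset_iff_toFinset (a b : List String) :
    PySem.Set.issubset a b = true ↔ a.toFinset ⊆ b.toFinset := by
  rw [PySem.Set.issubset_iff]
  constructor
  · intro h x hx
    simp only [List.mem_toFinset] at *
    exact h x hx
  · intro h x hx
    have := h (List.mem_toFinset.mpr hx)
    exact List.mem_toFinset.mp this

theorem fold_eq_main (L acc : List (List String))
    (hs : L.Pairwise (fun a b => pvSetLen a ≤ pvSetLen b))
    (hacc : ∀ s ∈ acc, ∀ y ∈ L, pvSetLen s ≤ pvSetLen y) :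
    L.foldl
      (fun minimal siphon =>
        if minimal.any (fun existing => PySem.Set.issubset siphon existing) then minimal
        else (minimal.filter (fun s => !(PySem.Set.issubset siphon s))) ++ [siphon]) acc
    =
    (L.foldl
      (fun (st : List (Finset String) × List (List String)) siphon =>
        if siphon.toFinset ∈ st.1 then st
        else (st.1 ++ [siphon.toFinset], st.2 ++ [siphon]))
      (acc.map List.toFinset, acc)).2 := by
  induction L generalizing acc with
  | nil => simp
  | cons x L ih =>
    simp only [List.foldl_cons]
    rcases List.pairwise_cons.mp hs with ⟨hx, hsL⟩
    have hcond : (acc.any (fun existing => PySem.Set.issubset x existing) = true)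
        ↔ (x.toFinset ∈ acc.map List.toFinset) := by
      rw [List.any_eq_true]
      constructor
      · rintro ⟨e, he, hsub⟩
        have h1 : x.toFinset ⊆ e.toFinset := (issubset_iff_toFinset x e).mp hsub
        have h2 : pvSetLen e ≤ pvSetLen x := hacc e he x (List.mem_cons_self ..)
        rw [pvSetLen_eq_card, pvSetLen_eq_card] at h2
        have h2' : e.toFinset.card ≤ x.toFinset.card := by exact_mod_cast h2
        have : x.toFinset = e.toFinset := Finset.eq_of_subset_of_card_le h1 h2'
        exact List.mem_map.mpr ⟨e, he, this.symm⟩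
      · intro hmem
        rcases List.mem_map.mp hmem with ⟨e, he, heq⟩
        refine ⟨e, he, (issubset_iff_toFinset x e).mpr ?_⟩
        rw [heq]
    by_cases hc : x.toFinset ∈ acc.map List.toFinset
    · rw [if_pos (hcond.mpr hc), if_pos hc]
      exact ih acc hsL (fun s hsm y hy => hacc s hsm y (List.mem_cons_of_mem _ hy))
    · have hA : acc.any (fun existing => PySem.Set.issubset x existing) = false := by
        rw [← Bool.not_eq_true, hcond]; exact hc
      rw [if_neg hc, hA, if_neg (by simp)]
      have hfilter : acc.filter (fun s => !(PySem.Set.issubset x s)) = acc := by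
        apply List.filter_eq_self.mpr
        intro s hsm
        have : PySem.Set.issubset x s = false := by
          by_contra hne
          have : PySem.Set.issubset x s = true := by
            cases h : PySem.Set.issubset x s <;> simp_all
          have ht : acc.any (fun existing => PySem.Set.issubset x existing) = true :=
            List.any_eq_true.mpr ⟨s, hsm, this⟩
          rw [hA] at ht
          exact Bool.noConfusion ht
        simp [this]
      rw [hfilter]
      have hmap : acc.map List.toFinset ++ [x.toFinset] = (acc ++ [x]).map List.toFinset := by
        simp
      rw [hmap]
      apply ih (acc ++ [x]) hsL
      intro s hsm y hy
      rcases List.mem_append.mp hsm with h | h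
      · exact hacc s h y (List.mem_cons_of_mem _ hy)
      · rw [List.mem_singleton.mp h]
        exact hx y hy

-- ===== VERDICT (by name: the statement is the Claim_ definition above) =====
theorem filter_minimal_siphons_py_spec : Claim_equal_filter_minimal_siphons_py := by
  intro siphons _
  unfold Spec_filter_minimal_siphons_py filter_minimal_siphons_py filter_minimal_siphons_py_alt
  exact fold_eq_main _ [] (PySem.List.sorted_pairwise ..) (by simp)
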